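-- pv_equiv track=rewrite | github.com/Nihal-197/MMM | mmm_post_pro.py | col_drop
-- ===== SOURCE A (Python) =====
-- def col_drop(hier,hier_list):
--     col_2_drop=[]
--     j=0
--     for i in hier_list:
--         j+=1
--         if (i==hier):
--             col_2_drop=hier_list[j:]
--     return col_2_drop
-- ===== SOURCE B (Python) =====
-- def col_drop(hier, hier_list):
--     for i in range(len(hier_list) - 1, -1, -1):
--         if hier_list[i] == hier:
--             return hier_list[i + 1:]
--     return []
-- ===== Notes on version B (the rewrite author's own statement) =====
-- stated objective: alternative
-- what changed: B scans backwards from the end and returns the suffix right after the first match it sees (early exit), instead of A's forward scan that re-captures the slice at every match.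
import Mathlib
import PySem

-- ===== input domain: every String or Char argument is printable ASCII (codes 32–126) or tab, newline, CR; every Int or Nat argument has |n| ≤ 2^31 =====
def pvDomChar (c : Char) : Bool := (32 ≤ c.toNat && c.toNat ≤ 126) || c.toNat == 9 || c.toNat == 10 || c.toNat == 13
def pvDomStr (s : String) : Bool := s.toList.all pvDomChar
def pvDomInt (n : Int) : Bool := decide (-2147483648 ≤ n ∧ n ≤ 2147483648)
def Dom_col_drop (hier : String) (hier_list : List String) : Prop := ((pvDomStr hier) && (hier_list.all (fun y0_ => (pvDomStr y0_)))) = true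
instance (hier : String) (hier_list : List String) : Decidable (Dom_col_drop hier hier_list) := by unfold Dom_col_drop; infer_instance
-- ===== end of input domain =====

-- B replaces A's forward scan (which re-captures the trailing slice at every match)
-- with a backward index scan that returns the suffix after the first match found (early exit).


-- ===== PORT A =====
-- fold over hier_list with state (col_2_drop, j); hier_list[j:] with j ≥ 0 is
-- List.drop j (exact: PySem.List.slice_from_natCast)
def col_drop (hier : String) (hier_list : List String) : List String :=
  (hier_list.foldl
    (fun (st : List String × Nat) i =>
      let j := st.2 + 1
      (if i = hier then hier_list.drop j else st.1, j))
    ([], 0)).1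

-- ===== PORT B =====
-- backward index scan: checks index n-1, n-2, …, 0; returns hier_list[i+1:]
-- (= drop (i+1), index nonnegative) at the first match, [] if none.
def colDropGo (hier : String) (hier_list : List String) : Nat → List String
  | 0 => []
  | n + 1 =>
    if hier_list[n]? = some hier then hier_list.drop (n + 1)
    else colDropGo hier hier_list n

def col_drop_alt (hier : String) (hier_list : List String) : List String :=
  colDropGo hier hier_list hier_list.length

-- ===== PRECONDITION & SPEC =====
def Spec_col_drop (hier : String) (hier_list : List String) (out : List String) : Prop := out = col_drop_alt hier hier_list
instance (hier : String) (hier_list : List String) (out : List String) : Decidable (Spec_col_drop hier hier_list out) := by unfold Spec_col_drop; infer_instance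

-- ===== CLAIM (what is proved, stated in full; the proofs are below) =====
def Claim_equal_col_drop : Prop := ∀ (hier : String) (hier_list : List String), Dom_col_drop hier hier_list → Spec_col_drop hier hier_list (col_drop hier hier_list)

-- ===== LEMMAS AND PROOFS =====

/-- index of the last occurrence of `hier`, or none -/
def lastIdx (hier : String) : List String → Option Nat
  | [] => none
  | x :: xs =>
    match lastIdx hier xs with
    | some k => some (k + 1)
    | none => if x = hier then some 0 else none

theorem lastIdx_append_singleton (hier x : String) (ys : List String) :
    lastIdx hier (ys ++ [x]) = if x = hier then some ys.length else lastIdx hier ys := by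
  induction ys with
  | nil => simp [lastIdx]
  | cons y ys ih =>
    simp only [List.cons_append, lastIdx, ih]
    by_cases h : x = hier <;> simp [h]

theorem col_drop_fold (hier : String) (full : List String) :
    ∀ (l pre c : List String), full = pre ++ l →
    (l.foldl
      (fun (st : List String × Nat) i =>
        let j := st.2 + 1
        (if i = hier then full.drop j else st.1, j))
      (c, pre.length)).1
    = match lastIdx hier l with
      | some k => full.drop (pre.length + k + 1)
      | none => c := by
  intro l
  induction l with
  | nil => intro pre c _; simp [lastIdx]
  | cons x xs ih =>
    intro pre c hfull
    have h1 : (pre ++ [x]).length = pre.length + 1 := by simp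
    have hfull' : full = (pre ++ [x]) ++ xs := by simp [hfull]
    simp only [List.foldl_cons]
    have := ih (pre ++ [x]) (if x = hier then full.drop (pre.length + 1) else c) hfull'
    rw [h1] at this
    rw [this]
    cases hl : lastIdx hier xs with
    | some k =>
      simp [lastIdx, hl]
      congr 1
      omega
    | none =>
      by_cases hx : x = hier <;> simp [lastIdx, hl, hx]

theorem colDropGo_eq (hier : String) (full : List String) :
    ∀ n, n ≤ full.length →
    colDropGo hier full n
    = match lastIdx hier (full.take n) with
      | some k => full.drop (k + 1)
      | none => [] := by
  intro n
  induction n with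
  | zero => intro _; simp [colDropGo, lastIdx]
  | succ n ih =>
    intro hn
    have hlt : n < full.length := by omega
    have htake : full.take (n + 1) = full.take n ++ [full[n]] := by
      rw [List.take_add_one, List.getElem?_eq_getElem hlt]; rfl
    rw [colDropGo, htake, lastIdx_append_singleton, List.getElem?_eq_getElem hlt]
    have hlen : (full.take n).length = n := by simp [List.length_take]; omega
    by_cases hx : full[n] = hier
    · simp [hx, hlen]
    · have : ¬ (some full[n] = some hier) := by simpa using hx
      simp [hx, this, ih (by omega)]

-- ===== VERDICT (by name: the statement is the Claim_ definition above) =====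
theorem col_drop_spec : Claim_equal_col_drop := by
  intro hier hier_list _
  unfold Spec_col_drop col_drop col_drop_alt
  rw [show (0 : Nat) = ([] : List String).length from rfl,
      col_drop_fold hier hier_list hier_list [] [] (by simp),
      colDropGo_eq hier hier_list hier_list.length (le_refl _)]
  simp
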